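-- pv_equiv track=rewrite | github.com/xxxprincemaker/MonopolyUsingMarkovChain | 1b.py | achar_passos_ate_a_cadeia
-- ===== SOURCE A (Python) =====
-- turnos = 100000
--
-- def achar_passos_ate_a_cadeia(lista_de_rolagem):
--     passos = []
--     for i in range(len(lista_de_rolagem)):
--         if not lista_de_rolagem[i][4] == 'Cadeia':
--             if not lista_de_rolagem[i][3]:
--                 passos.append([i][0])
--         else:
--             break
--         if len(passos) >= turnos:
--             return 0
--     return len(passos)
-- ===== SOURCE B (Python) =====
-- turnos = 100000
--
-- def achar_passos_ate_a_cadeia(lista_de_rolagem):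
--     # Right-to-left fold: every 'Cadeia' resets the accumulator, so after the
--     # whole pass acc equals the count of non-double rolls before the FIRST 'Cadeia'.
--     acc = 0
--     for r in reversed(lista_de_rolagem):
--         if r[4] == 'Cadeia':
--             acc = 0
--         elif not r[3]:
--             acc += 1
--     return 0 if acc >= turnos else acc
-- ===== Notes on version B (the rewrite author's own statement) =====
-- stated objective: alternative
-- what changed: Replaces A's forward scan with break and mid-loop early-return by a single right-to-left fold whose accumulator is reset to zero at every 'Cadeia' row (no break, no boundary search), with the turnos cap applied once at the end.
import Mathlib
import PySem

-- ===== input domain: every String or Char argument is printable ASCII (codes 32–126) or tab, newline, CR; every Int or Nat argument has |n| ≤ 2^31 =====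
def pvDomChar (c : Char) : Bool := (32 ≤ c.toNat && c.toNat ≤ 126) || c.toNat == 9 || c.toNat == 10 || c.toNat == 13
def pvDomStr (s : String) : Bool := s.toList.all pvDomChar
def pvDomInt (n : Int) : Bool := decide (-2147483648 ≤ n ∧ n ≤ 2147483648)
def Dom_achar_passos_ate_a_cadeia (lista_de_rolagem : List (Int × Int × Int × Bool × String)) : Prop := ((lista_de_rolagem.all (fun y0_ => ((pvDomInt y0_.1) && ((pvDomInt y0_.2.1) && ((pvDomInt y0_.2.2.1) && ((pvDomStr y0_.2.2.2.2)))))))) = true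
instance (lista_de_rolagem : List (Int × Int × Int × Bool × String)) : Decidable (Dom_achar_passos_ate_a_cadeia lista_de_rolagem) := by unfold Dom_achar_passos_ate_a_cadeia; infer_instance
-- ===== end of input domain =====

-- B replaces A's forward scan-with-break and mid-loop early return by one right-to-left
-- fold whose accumulator resets at every 'Cadeia', capped once at the end (objective: alternative).

-- ===== PORT A =====
-- the loop of A: index i, accumulator list `passos`; break on 'Cadeia',
-- early return 0 when the accumulator reaches `turnos` (= 100000)
def acharLoopA (l : List (Int × Int × Int × Bool × String)) (i : Nat) (passos : List Int) : Int :=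
  if h : i < l.length then
    let r := l[i]
    if ¬ (r.2.2.2.2 == "Cadeia") then
      let passos' := if ¬ r.2.2.2.1 then passos ++ [(Int.ofNat i)] else passos
      if passos'.length ≥ 100000 then 0
      else acharLoopA l (i + 1) passos'
    else (passos.length : Int)
  else (passos.length : Int)
termination_by l.length - i

def achar_passos_ate_a_cadeia (lista_de_rolagem : List (Int × Int × Int × Bool × String)) : Int :=
  acharLoopA lista_de_rolagem 0 []

-- ===== PORT B =====
-- Source B: fold over reversed list; reset acc at 'Cadeia', else add 1 for non-doubles
def achar_passos_ate_a_cadeia_alt (lista_de_rolagem : List (Int × Int × Int × Bool × String)) : Int :=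
  let acc := lista_de_rolagem.reverse.foldl
    (fun acc r => if r.2.2.2.2 == "Cadeia" then 0 else if !r.2.2.2.1 then acc + 1 else acc) 0
  if acc ≥ 100000 then 0 else (acc : Int)

-- ===== PRECONDITION & SPEC =====
def Spec_achar_passos_ate_a_cadeia (lista_de_rolagem : List (Int × Int × Int × Bool × String)) (out : Int) : Prop := out = achar_passos_ate_a_cadeia_alt lista_de_rolagem
instance (lista_de_rolagem : List (Int × Int × Int × Bool × String)) (out : Int) : Decidable (Spec_achar_passos_ate_a_cadeia lista_de_rolagem out) := by unfold Spec_achar_passos_ate_a_cadeia; infer_instance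

-- ===== CLAIM (what is proved, stated in full; the proofs are below) =====
def Claim_equal_achar_passos_ate_a_cadeia : Prop := ∀ (lista_de_rolagem : List (Int × Int × Int × Bool × String)), Dom_achar_passos_ate_a_cadeia lista_de_rolagem → Spec_achar_passos_ate_a_cadeia lista_de_rolagem (achar_passos_ate_a_cadeia lista_de_rolagem)

-- ===== LEMMAS AND PROOFS =====

-- number of counted steps in the prefix of `s` before its first 'Cadeia'
def prefCount (s : List (Int × Int × Int × Bool × String)) : Nat :=
  match s with
  | [] => 0
  | r :: t => if r.2.2.2.2 == "Cadeia" then 0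
              else (if ¬ r.2.2.2.1 then 1 else 0) + prefCount t

theorem acharLoopA_eq (s : List (Int × Int × Int × Bool × String)) :
    ∀ (l : List (Int × Int × Int × Bool × String)) (i : Nat) (passos : List Int),
    s = l.drop i → passos.length < 100000 →
    acharLoopA l i passos =
      (if passos.length + prefCount s ≥ 100000 then 0
       else ((passos.length + prefCount s : Nat) : Int)) := by
  induction s with
  | nil =>
    intro l i passos hs hlt
    have hge : l.length ≤ i := by
      by_contra hc
      have := List.drop_eq_nil_iff.mp hs.symm
      omega
    rw [acharLoopA, dif_neg (by omega)]
    simp [prefCount]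
    omega
  | cons r t ih =>
    intro l i passos hs hlt
    have hi : i < l.length := by
      by_contra hc
      rw [List.drop_eq_nil_iff.mpr (by omega)] at hs
      simp at hs
    have hget : l[i] = r := by
      have h2 : (l.drop i)[0]'(by rw [← hs]; simp) = r := by
        simp [← hs]
      rw [List.getElem_drop] at h2
      simpa using h2
    have hdrop : t = l.drop (i + 1) := by
      have h3 : (l.drop i).tail = l.drop (i + 1) := by
        simp [List.tail_drop]
      rw [← hs] at h3
      simpa using h3
    rw [acharLoopA, dif_pos hi]
    simp only [hget]
    by_cases hc : r.2.2.2.2 == "Cadeia"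
    · simp only [hc, not_true_eq_false, if_false, prefCount]
      simp
      omega
    · simp only [hc, not_false_eq_true, if_true, Bool.false_eq_true]
      have hpc : prefCount (r :: t) = (if ¬ r.2.2.2.1 then 1 else 0) + prefCount t := by
        simp [prefCount, hc]
      by_cases hd : r.2.2.2.1
      · -- double roll: nothing appended
        have hcap : ¬ (passos.length ≥ 100000) := by omega
        rw [if_neg (by simpa [hd] using hcap)]
        have hrec := ih l (i + 1) passos hdrop hlt
        simp only [hd, not_true_eq_false, if_false] at *
        simp [hrec, hpc]
      · -- counted roll: i appended
        simp only [hd, Bool.false_eq_true, not_false_eq_true, if_true]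
        have hlen : (passos ++ [(Int.ofNat i)]).length = passos.length + 1 := by simp
        by_cases hcap : (passos ++ [(Int.ofNat i)]).length ≥ 100000
        · rw [if_pos hcap]
          rw [if_pos (by rw [hpc]; simp [hd]; omega)]
        · rw [if_neg hcap]
          have hrec := ih l (i + 1) (passos ++ [(Int.ofNat i)]) hdrop (by omega)
          rw [hrec, hpc]
          simp only [hlen, hd, Bool.false_eq_true, not_false_eq_true, if_true]
          by_cases hbig : passos.length + (1 + prefCount t) ≥ 100000
          · rw [if_pos (by omega), if_pos hbig]
          · rw [if_neg (by omega), if_neg hbig]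
            omega

-- B's reversed fold computes prefCount: a 'Cadeia' resets the accumulator, so only
-- the elements left of the first 'Cadeia' survive
theorem foldr_eq_prefCount (l : List (Int × Int × Int × Bool × String)) :
    l.reverse.foldl
      (fun (acc : Int) r => if r.2.2.2.2 == "Cadeia" then 0 else if !r.2.2.2.1 then acc + 1 else acc) 0
    = (prefCount l : Int) := by
  rw [List.foldl_reverse]
  induction l with
  | nil => simp [prefCount]
  | cons r t ih =>
    simp only [List.foldr_cons, ih, prefCount]
    by_cases hc : r.2.2.2.2 == "Cadeia"
    · simp [hc]
    · by_cases hd : r.2.2.2.1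
      · simp [hc, hd]
      · simp [hc, hd]
        ring

-- ===== VERDICT (by name: the statement is the Claim_ definition above) =====
theorem achar_passos_ate_a_cadeia_spec : Claim_equal_achar_passos_ate_a_cadeia := by
  intro l _
  unfold Spec_achar_passos_ate_a_cadeia achar_passos_ate_a_cadeia achar_passos_ate_a_cadeia_alt
  have := acharLoopA_eq l l 0 [] (by simp) (by simp)
  simp only [List.length_nil, Nat.zero_add] at this
  rw [this]
  simp only [foldr_eq_prefCount]
  split_ifs <;> omega
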